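-- pv_equiv track=rewrite | github.com/creepereye1204/TIL | Algorithm/프로그래머스/구현/Level3/숫자 게임/code.py | solution
-- ===== SOURCE A (Python) =====
-- from collections import deque
--
-- def solution(A, B):
--     answer = 0
--     A.sort()
--     B.sort()
--     A = deque(A)
--     B = deque(B)
--     while A and B:
--         a = A.popleft()
--         while B and a >= B[0]:
--             B.popleft()
--
--         if not B:
--             break
--
--         else:
--             B.popleft()
--             answer += 1
--
--     return answer
-- ===== SOURCE B (Python) =====
-- def solution(A, B):
--     A.sort()
--     B.sort()
--     count = 0
--     i = 0
--     for b in B: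
--         if i < len(A) and b > A[i]:
--             count += 1
--             i += 1
--     return count
-- ===== Notes on version B (the rewrite author's own statement) =====
-- stated objective: simpler
-- what changed: Replaced A's deque conversion with an outer while plus a nested inner drain loop by a single for-loop over sorted B with one index into sorted A that advances only on a win.
import Mathlib
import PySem

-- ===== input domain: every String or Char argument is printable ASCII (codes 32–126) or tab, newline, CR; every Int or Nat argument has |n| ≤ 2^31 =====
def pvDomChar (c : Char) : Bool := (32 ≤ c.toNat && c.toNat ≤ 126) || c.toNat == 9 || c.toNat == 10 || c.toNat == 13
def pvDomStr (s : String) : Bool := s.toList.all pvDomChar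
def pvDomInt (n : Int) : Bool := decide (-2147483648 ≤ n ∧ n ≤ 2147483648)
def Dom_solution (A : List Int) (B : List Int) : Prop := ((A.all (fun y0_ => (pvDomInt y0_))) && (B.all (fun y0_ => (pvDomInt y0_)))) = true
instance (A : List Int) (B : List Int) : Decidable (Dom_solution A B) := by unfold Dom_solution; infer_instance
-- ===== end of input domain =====

-- B replaces A's deque + nested inner drain loop with a single for-loop over sorted B and
-- one index into sorted A (objective: simpler). Both Pythons sort A and B in place; the
-- equivalence proved here is about the return value (the mutation is identical anyway).

-- ===== PORT A =====
-- inner `while B and a >= B[0]: B.popleft()`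
def pvDrain (a : Int) : List Int → List Int
  | [] => []
  | b :: bs => if a ≥ b then pvDrain a bs else b :: bs

-- outer `while A and B` loop over the two deques
def pvPlayA (A B : List Int) : Int :=
  match A with
  | [] => 0
  | a :: As =>
    if B.isEmpty then 0
    else
      match pvDrain a B with
      | [] => 0
      | _ :: B'' => 1 + pvPlayA As B''

def solution (A : List Int) (B : List Int) : Int :=
  pvPlayA (PySem.List.sorted A (fun x => x) false) (PySem.List.sorted B (fun x => x) false)

-- ===== PORT B =====
-- `for b in B: if i < len(A) and b > A[i]: count += 1; i += 1`
def pvStep (sA : List Int) (s : Nat × Int) (b : Int) : Nat × Int :=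
  if s.1 < sA.length ∧ sA.getD s.1 0 < b then (s.1 + 1, s.2 + 1) else s

def solution_alt (A : List Int) (B : List Int) : Int :=
  let sA := PySem.List.sorted A (fun x => x) false
  let sB := PySem.List.sorted B (fun x => x) false
  (sB.foldl (pvStep sA) (0, 0)).2

-- ===== PRECONDITION & SPEC =====
def Spec_solution (A : List Int) (B : List Int) (out : Int) : Prop := out = solution_alt A B
instance (A : List Int) (B : List Int) (out : Int) : Decidable (Spec_solution A B out) := by unfold Spec_solution; infer_instance

-- ===== CLAIM (what is proved, stated in full; the proofs are below) =====
def Claim_equal_solution : Prop := ∀ (A : List Int) (B : List Int), Dom_solution A B → Spec_solution A B (solution A B)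

-- ===== LEMMAS AND PROOFS =====

theorem pvPlayA_nil_right (A : List Int) : pvPlayA A [] = 0 := by
  cases A <;> simp [pvPlayA, List.isEmpty]

theorem pvPlayA_cons_cons (a b : Int) (As Bs : List Int) :
    pvPlayA (a :: As) (b :: Bs) =
      if a ≥ b then pvPlayA (a :: As) Bs else 1 + pvPlayA As Bs := by
  by_cases h : a ≥ b
  · simp only [h, if_pos]
    cases Bs with
    | nil => simp [pvPlayA, pvDrain, h]
    | cons b' Bs' => simp [pvPlayA, pvDrain, h, List.isEmpty]
  · simp [pvPlayA, pvDrain, h, List.isEmpty]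

-- loop invariant: folding B from A-index i adds pvPlayA (A.drop i) B to the count
theorem pvFold_eq (sA : List Int) (B : List Int) :
    ∀ (i : Nat) (c : Int),
      (B.foldl (pvStep sA) (i, c)).2 = c + pvPlayA (sA.drop i) B := by
  induction B with
  | nil => intro i c; simp [pvPlayA_nil_right]
  | cons b Bs ih =>
    intro i c
    simp only [List.foldl_cons, pvStep]
    by_cases hi : i < sA.length
    · have hdrop : sA.drop i = sA[i] :: sA.drop (i + 1) := List.drop_eq_getElem_cons hi
      have hgd : sA.getD i 0 = sA[i] := List.getD_eq_getElem _ _ hi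
      by_cases hb : sA[i] < b
      · have hc : (i, c).1 < sA.length ∧ sA.getD (i, c).1 0 < b := ⟨hi, by rw [hgd]; exact hb⟩
        rw [if_pos hc, ih, hdrop, pvPlayA_cons_cons, if_neg (by omega)]
        omega
      · have hc : ¬((i, c).1 < sA.length ∧ sA.getD (i, c).1 0 < b) := by
          rw [hgd]; exact fun h => hb h.2
        rw [if_neg hc, ih, hdrop, pvPlayA_cons_cons]
        rw [if_pos (by omega : sA[i] ≥ b)]
    · have hdrop : sA.drop i = [] := List.drop_eq_nil_of_le (by omega)
      have hc : ¬((i, c).1 < sA.length ∧ sA.getD (i, c).1 0 < b) := fun h => hi h.1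
      rw [if_neg hc, ih, hdrop]
      simp [pvPlayA]

-- ===== VERDICT (by name: the statement is the Claim_ definition above) =====
theorem solution_spec : Claim_equal_solution := by
  intro A B _
  unfold Spec_solution solution solution_alt
  rw [pvFold_eq]
  simp
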